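-- pv_equiv track=rewrite | github.com/FEDso/CheckioPython | Escher/ship_teams.py | two_teams
-- ===== SOURCE A (Python) =====
-- def two_teams(sailors):
--     ship1 = []
--     ship2 = []
--     for key, value in sailors.items():
--         if 20 <= value <= 40:
--             ship2.append(key)
--         else:
--             ship1.append(key)
--     return [
--         sorted(ship1),
--         sorted(ship2)
--     ]
-- ===== SOURCE B (Python) =====
-- def two_teams(sailors):
--     ship1 = []
--     ship2 = []
--     for key, value in sailors.items():
--         ship = ship2 if 20 <= value <= 40 else ship1
--         i = 0
--         while i < len(ship) and ship[i] <= key: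
--             i += 1
--         ship.insert(i, key)
--     return [ship1, ship2]
-- ===== Notes on version B (the rewrite author's own statement) =====
-- stated objective: alternative
-- what changed: A partitions the names and then calls sorted() on each bucket; B never calls sorted(): it keeps both buckets sorted at all times, inserting each name at its position by a hand-written scan (online insertion sort), one pass, no sort built-in.
import Mathlib
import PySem

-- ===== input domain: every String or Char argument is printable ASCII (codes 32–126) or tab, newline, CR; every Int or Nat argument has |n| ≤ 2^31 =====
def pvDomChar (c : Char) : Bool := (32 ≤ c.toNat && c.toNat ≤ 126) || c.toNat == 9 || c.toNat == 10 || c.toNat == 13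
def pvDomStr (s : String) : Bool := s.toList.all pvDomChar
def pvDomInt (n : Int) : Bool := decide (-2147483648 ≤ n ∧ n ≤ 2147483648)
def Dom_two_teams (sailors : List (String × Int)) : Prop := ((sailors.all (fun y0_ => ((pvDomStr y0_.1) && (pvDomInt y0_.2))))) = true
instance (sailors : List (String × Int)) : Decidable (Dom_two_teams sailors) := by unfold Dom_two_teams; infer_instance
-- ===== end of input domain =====

-- B keeps both buckets sorted at all times by inserting each name with a hand-written
-- scan (online insertion sort, no sorted() call), instead of A's partition-then-sort-each-bucket.


-- ===== PORT A =====
-- for key, value in sailors.items(): append to ship2 if 20 <= value <= 40 else ship1;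
-- return [sorted(ship1), sorted(ship2)]
def two_teams (sailors : List (String × Int)) : List (List String) :=
  let r := sailors.foldl
    (fun (s : List String × List String) kv =>
      if 20 ≤ kv.2 ∧ kv.2 ≤ 40 then (s.1, s.2 ++ [kv.1]) else (s.1 ++ [kv.1], s.2))
    ([], [])
  [PySem.List.sorted r.1 (fun x => x) false, PySem.List.sorted r.2 (fun x => x) false]

-- ===== PORT B =====
-- B's inner while loop scans a sorted bucket past every element ≤ key and inserts key
-- there (i.e. right before the first strictly greater element); ported as the structural
-- recursion doing exactly that scan-and-insert.
def pvBInsert (k : String) : List String → List String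
  | [] => [k]
  | x :: t => if x ≤ k then x :: pvBInsert k t else k :: x :: t

-- single pass over sailors.items(), inserting each key into the sorted bucket chosen by value
def two_teams_alt (sailors : List (String × Int)) : List (List String) :=
  let r := sailors.foldl
    (fun (s : List String × List String) kv =>
      if 20 ≤ kv.2 ∧ kv.2 ≤ 40 then (s.1, pvBInsert kv.1 s.2) else (pvBInsert kv.1 s.1, s.2))
    ([], [])
  [r.1, r.2]

-- ===== PRECONDITION & SPEC =====
def Spec_two_teams (sailors : List (String × Int)) (out : List (List String)) : Prop := out = two_teams_alt sailors
instance (sailors : List (String × Int)) (out : List (List String)) : Decidable (Spec_two_teams sailors out) := by unfold Spec_two_teams; infer_instance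

-- ===== CLAIM =====
def Claim_equal_two_teams : Prop := ∀ (sailors : List (String × Int)), Dom_two_teams sailors → Spec_two_teams sailors (two_teams sailors)

-- ===== LEMMAS AND PROOFS =====

-- the two-bucket loop with any per-bucket update g is a pair of folds over the two filters
lemma pv_split {α β : Type} (q : α → Prop) [DecidablePred q] (g : β → α → β)
    (l : List α) (a b : β) :
    l.foldl (fun (s : β × β) x =>
        if q x then (s.1, g s.2 x) else (g s.1 x, s.2)) (a, b)
      = ((l.filter (fun x => decide ¬ q x)).foldl g a,
         (l.filter (fun x => decide (q x))).foldl g b) := by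
  induction l generalizing a b with
  | nil => simp
  | cons x t ih => by_cases h : q x <;> simp [h, ih]

-- appending one by one is map
lemma pv_appfold {α : Type} (f : α → String) (l : List α) (a : List String) :
    l.foldl (fun s x => s ++ [f x]) a = a ++ l.map f := by
  induction l generalizing a with
  | nil => simp
  | cons x t ih => simp [ih]

-- B's scan-insert is PySem's insertBy with the strict order
lemma pvBInsert_eq (k : String) (l : List String) :
    pvBInsert k l = PySem.List.insertBy (fun a b => decide (a < b)) k l := by
  induction l with
  | nil => rfl
  | cons x t ih =>
    by_cases h : k < x
    · simp [pvBInsert, PySem.List.insertBy, h, not_le.mpr h]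
    · simp only [pvBInsert, PySem.List.insertBy, if_pos (not_lt.mp h), ih]
      rw [if_neg (by simpa using h)]

-- folding B's insert over a list of pairs is sorted() of the projected keys
lemma pv_insfold (l : List (String × Int)) :
    l.foldl (fun s kv => pvBInsert kv.1 s) []
      = PySem.List.sorted (l.map Prod.fst) (fun x => x) false := by
  rw [PySem.List.sorted_eq_foldl_insertBy (l.map Prod.fst) (fun x => x), List.foldl_map]
  simp [pvBInsert_eq]

-- ===== VERDICT =====
theorem two_teams_spec : Claim_equal_two_teams := by
  intro sailors _
  unfold Spec_two_teams two_teams two_teams_alt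
  rw [pv_split (q := fun kv : String × Int => 20 ≤ kv.2 ∧ kv.2 ≤ 40)
      (g := fun (s : List String) (kv : String × Int) => s ++ [kv.1]) sailors [] [],
    pv_split (q := fun kv : String × Int => 20 ≤ kv.2 ∧ kv.2 ≤ 40)
      (g := fun (s : List String) (kv : String × Int) => pvBInsert kv.1 s) sailors [] []]
  simp only [pv_appfold, pv_insfold, List.nil_append]
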